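-- pv_equiv track=rewrite | github.com/Joost987/AdventOfCode23 | Day12CodePart1.py | Function
-- ===== SOURCE A (Python) =====
-- def Function(number,symbollist):
--     possiblestarts=[]
--     FoundLatest=False
--     latest=len(symbollist)
--     for i in range(len(symbollist)-number):
--         startloc=True
--         for j in range(i,i+number):
--             if symbollist[j]==".":
--                 startloc=False
--                 break
--             if symbollist[j]=="#" and not FoundLatest:
--                 FoundLatest=True
--                 latest=j
--
--         if startloc and symbollist[i+number]!="#":
--             possiblestarts.append(i)
--         if FoundLatest and i==latest:
--             break
--     return possiblestarts
-- ===== SOURCE B (Python) =====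
-- def Function(number, symbollist):
--     # Single right-to-left pass tracking next '.'/'#' positions; O(n) instead of O(n*number).
--     n = len(symbollist)
--     dnext = n  # index of first '.' at or after i (n = none)
--     hnext = n  # index of first '#' at or after i (n = none)
--     latest = None  # position of the first '#' A's scans would examine
--     res = []
--     for i in range(n - 1, -1, -1):
--         c = symbollist[i]
--         if c == '.':
--             dnext = i
--         elif c == '#':
--             hnext = i
--         if i < n - number:
--             if hnext < i + number and hnext < dnext:
--                 latest = hnext
--             if dnext >= i + number and symbollist[i + number] != '#':
--                 res.append(i)
--     res.reverse()
--     if latest is not None: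
--         res = [x for x in res if x <= latest]
--     return res
-- ===== Notes on version B (the rewrite author's own statement) =====
-- stated objective: faster
-- what changed: Instead of rescanning each length-number window with a nested loop, B makes one right-to-left pass maintaining the positions of the next '.' and next '#', answering each window check in O(1), records the break position (the first '#' the original scans would examine) and truncates the result list once at the end.
-- outside the precondition, e.g. on Function(-2, 'a.b'): A returns [0, 1, 2, 3, 4], B returns [0, 1, 2]
import Mathlib
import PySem

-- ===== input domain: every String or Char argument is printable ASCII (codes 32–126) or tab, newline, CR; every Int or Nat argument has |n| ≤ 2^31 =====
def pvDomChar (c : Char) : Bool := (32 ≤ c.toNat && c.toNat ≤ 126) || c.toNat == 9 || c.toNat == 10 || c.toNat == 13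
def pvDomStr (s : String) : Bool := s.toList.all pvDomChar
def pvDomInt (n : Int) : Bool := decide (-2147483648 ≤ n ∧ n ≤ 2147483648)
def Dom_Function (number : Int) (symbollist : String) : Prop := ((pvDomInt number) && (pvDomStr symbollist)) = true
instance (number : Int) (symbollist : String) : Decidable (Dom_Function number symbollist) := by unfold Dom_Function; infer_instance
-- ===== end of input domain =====

-- B replaces A's nested per-window rescans by one right-to-left pass tracking next-'.'/'#' positions plus a final truncation; proved equal to A for number ≥ 0.


-- ===== PORT A =====
-- inner loop 'for j in range(i, i+number)' with its break; returns (startloc, FoundLatest, latest)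
def aInner (cs : List Char) (js : List Int) (FL : Bool) (latest : Int) : Bool × Bool × Int :=
  match js with
  | [] => (true, FL, latest)
  | j :: rest =>
    if PySem.List.pyGetD cs j ' ' = '.' then (false, FL, latest)
    else if PySem.List.pyGetD cs j ' ' = '#' ∧ FL = false then aInner cs rest true j
    else aInner cs rest FL latest


-- outer loop 'for i in range(len(symbollist)-number)' with its break
def aOuter (cs : List Char) (number : Int) : List Int → List Int → Bool → Int → List Int
  | [], ps, _, _ => ps
  | i :: rest, ps, FL, latest =>
    let r := aInner cs (PySem.List.pyRange i (i + number) 1) FL latest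
    let ps' := if r.1 = true ∧ PySem.List.pyGetD cs (i + number) ' ' ≠ '#' then ps ++ [i] else ps
    if r.2.1 = true ∧ i = r.2.2 then ps' else aOuter cs number rest ps' r.2.1 r.2.2


def Function (number : Int) (symbollist : String) : List Int :=
  let cs := symbollist.toList
  aOuter cs number (PySem.List.pyRange 0 ((cs.length : Int) - number) 1) [] false (cs.length : Int)

-- ===== PORT B =====
-- one right-to-left pass; dnext/hnext = index of next '.'/'#' at or after i (cs.length = none)
def bLoop (cs : List Char) (number : Int) : List Int → Int → Int → Option Int → List Int → Option Int × List Int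
  | [], _, _, latest, res => (latest, res)
  | i :: rest, dnext, hnext, latest, res =>
    let dh := if PySem.List.pyGetD cs i ' ' = '.' then (i, hnext)
      else if PySem.List.pyGetD cs i ' ' = '#' then (dnext, i) else (dnext, hnext)
    if i < (cs.length : Int) - number then
      let latest' := if dh.2 < i + number ∧ dh.2 < dh.1 then some dh.2 else latest
      let res' := if dh.1 ≥ i + number ∧ PySem.List.pyGetD cs (i + number) ' ' ≠ '#' then res ++ [i] else res
      bLoop cs number rest dh.1 dh.2 latest' res'
    else bLoop cs number rest dh.1 dh.2 latest res


def Function_alt (number : Int) (symbollist : String) : List Int :=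
  let cs := symbollist.toList
  let r := bLoop cs number (PySem.List.pyRange ((cs.length : Int) - 1) (-1) (-1)) (cs.length : Int) (cs.length : Int) none []
  let res := r.2.reverse
  match r.1 with
  | none => res
  | some L => res.filter (fun x => x ≤ L)

-- ===== PRECONDITION & SPEC =====
-- Pre_ excludes negative number (a negative block length, outside the task's natural domain),
-- where A's returned value rests on Python's negative-index wraparound.
def Pre_Function (number : Int) (symbollist : String) : Prop := 0 ≤ number
instance (number : Int) (symbollist : String) : Decidable (Pre_Function number symbollist) := by unfold Pre_Function; infer_instance
def pvWitness_Function : Int × String := (2, "?#..#?")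

def Spec_Function (number : Int) (symbollist : String) (out : List Int) : Prop := out = Function_alt number symbollist
instance (number : Int) (symbollist : String) (out : List Int) : Decidable (Spec_Function number symbollist out) := by unfold Spec_Function; infer_instance

-- ===== CLAIM (what is proved, stated in full; the proofs are below) =====
def Claim_equal_Function : Prop := ∀ (number : Int) (symbollist : String), Dom_Function number symbollist → Pre_Function number symbollist → Spec_Function number symbollist (Function number symbollist)

-- ===== LEMMAS AND PROOFS =====
def nxt (ch : Char) (cs : List Char) (i : ℕ) : ℕ := i + ((cs.drop i).takeWhile (fun c => c ≠ ch)).length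
def condB (cs : List Char) (N t : ℕ) : Bool := decide (nxt '#' cs t < min (t + N) (nxt '.' cs t))

lemma nxt_ge (ch : Char) (cs : List Char) (i : ℕ) : i ≤ nxt ch cs i := Nat.le_add_right _ _
lemma nxt_of_le (ch : Char) (cs : List Char) (i : ℕ) (h : cs.length ≤ i) : nxt ch cs i = i := by
  simp [nxt, List.drop_eq_nil_of_le h]
lemma nxt_lt (ch : Char) (cs : List Char) (i : ℕ) (h : i < cs.length) :
    nxt ch cs i = if cs[i] = ch then i else nxt ch cs (i + 1) := by
  have hd : cs.drop i = cs[i] :: cs.drop (i + 1) := List.drop_eq_getElem_cons h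
  unfold nxt
  rw [hd, List.takeWhile_cons]
  by_cases hc : cs[i] = ch <;> simp [hc] <;> omega


def validB (cs : List Char) (N t : ℕ) : Bool := decide (t + N ≤ nxt '.' cs t) && decide (cs.getD (t + N) ' ' ≠ '#')


lemma inner_eq (cs : List Char) (m : ℕ) : ∀ (i : ℕ), i + m ≤ cs.length → ∀ (FL : Bool) (lat : ℤ),
    aInner cs (PySem.List.pyRange (i : ℤ) ((i : ℤ) + (m : ℤ)) 1) FL lat =
      (decide (i + m ≤ nxt '.' cs i), FL || condB cs m i,
       if FL = true then lat else if condB cs m i = true then ((nxt '#' cs i : ℕ) : ℤ) else lat) := by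
  induction m with
  | zero =>
    intro i _ FL lat
    have hg := nxt_ge '#' cs i
    have hg2 := nxt_ge '.' cs i
    have h1 : decide (i + 0 ≤ nxt '.' cs i) = true := by simp; omega
    have h2 : condB cs 0 i = false := by simp [condB]; omega
    rw [show (i:ℤ) + ((0:ℕ):ℤ) = (i:ℤ) by push_cast; ring, PySem.List.pyRange_one_eq_nil le_rfl]
    cases FL <;> simp [aInner, h1, h2] <;> exact hg2
  | succ m ih =>
    intro i h FL lat
    have hi : i < cs.length := by omega
    rw [PySem.List.pyRange_one_cons (by push_cast; omega : (i:ℤ) < (i:ℤ) + ((m+1:ℕ):ℤ))]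
    rw [show (i:ℤ) + 1 = ((i+1:ℕ):ℤ) by push_cast; ring,
        show (i:ℤ) + ((m+1:ℕ):ℤ) = ((i+1:ℕ):ℤ) + (m:ℤ) by push_cast; ring]
    have hget : PySem.List.pyGetD cs (i:ℤ) ' ' = cs[i] := by
      simp [PySem.List.pyGetD_natCast, List.getElem?_eq_getElem hi]
    simp only [aInner, hget]
    by_cases hdot : cs[i] = '.'
    · have hnd : nxt '.' cs i = i := by rw [nxt_lt _ _ _ hi, if_pos hdot]
      have hg := nxt_ge '#' cs i
      have h1 : decide (i + (m+1) ≤ nxt '.' cs i) = false := by simp [hnd]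
      have h2 : condB cs (m+1) i = false := by simp [condB, hnd]; omega
      cases FL <;> simp [hdot, h1, h2]
    · have hnd : nxt '.' cs i = nxt '.' cs (i+1) := by rw [nxt_lt _ _ _ hi, if_neg hdot]
      by_cases hhash : cs[i] = '#'
      · have hnh : nxt '#' cs i = i := by rw [nxt_lt _ _ _ hi, if_pos hhash]
        have hnd1 : i + 1 ≤ nxt '.' cs (i+1) := nxt_ge _ _ _
        have h2 : condB cs (m+1) i = true := by simp [condB, hnd, hnh]; omega
        cases FL with
        | false =>
          rw [if_neg hdot, if_pos ⟨hhash, rfl⟩, ih (i+1) (by omega) true (i:ℤ)]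
          have h1 : (i + (m+1) ≤ nxt '.' cs i) ↔ (i+1 + m ≤ nxt '.' cs (i+1)) := by rw [hnd]; omega
          simp [h1, h2, hnh]
        | true =>
          rw [if_neg hdot, if_neg (by simp), ih (i+1) (by omega) true lat]
          have h1 : (i + (m+1) ≤ nxt '.' cs i) ↔ (i+1 + m ≤ nxt '.' cs (i+1)) := by rw [hnd]; omega
          simp [h1, h2]
      · have hnh : nxt '#' cs i = nxt '#' cs (i+1) := by rw [nxt_lt _ _ _ hi, if_neg hhash]
        have h1 : (i + (m+1) ≤ nxt '.' cs i) ↔ (i+1 + m ≤ nxt '.' cs (i+1)) := by rw [hnd]; omega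
        have h2 : condB cs (m+1) i = condB cs m (i+1) := by
          simp only [condB, hnd, hnh, show i + (m+1) = i+1+m from by omega]
        rw [if_neg hdot, if_neg (by simp [hhash]), ih (i+1) (by omega) FL lat]
        cases FL <;> simp [h1, h2, hnh]

lemma getD_cast (cs : List Char) (i N : ℕ) :
    PySem.List.pyGetD cs ((i:ℤ) + (N:ℤ)) ' ' = cs.getD (i + N) ' ' := by
  rw [show (i:ℤ) + (N:ℤ) = ((i+N:ℕ):ℤ) by push_cast; ring, PySem.List.pyGetD_natCast]


lemma outer_true (cs : List Char) (N k L : ℕ) (hkN : k + N ≤ cs.length) (cnt : ℕ) :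
    ∀ (i : ℕ), i + cnt = k → i ≤ L → ∀ (ps : List ℤ),
    aOuter cs (N:ℤ) (PySem.List.pyRange (i:ℤ) (k:ℤ) 1) ps true (L:ℤ) =
      ps ++ ((List.range' i (min k (L+1) - i)).filter (validB cs N)).map (Nat.cast : ℕ → ℤ) := by
  induction cnt with
  | zero =>
    intro i hik hiL ps
    rw [PySem.List.pyRange_one_eq_nil (by omega)]
    have : min k (L+1) - i = 0 := by omega
    simp [aOuter, this]
  | succ cnt ih =>
    intro i hik hiL ps
    have hik' : i < k := by omega
    rw [PySem.List.pyRange_one_cons (by exact_mod_cast hik')]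
    simp only [aOuter, inner_eq cs N i (by omega) true (L:ℤ), getD_cast]
    simp only [Bool.true_or, reduceIte]
    have hps' : (if decide (i + N ≤ nxt '.' cs i) = true ∧ cs.getD (i + N) ' ' ≠ '#' then ps ++ [(i:ℤ)] else ps)
        = ps ++ (if validB cs N i then [(i:ℤ)] else []) := by
      by_cases h1 : i + N ≤ nxt '.' cs i <;> by_cases h2 : cs[i + N]?.getD ' ' = '#' <;>
        simp [validB, h1, h2, List.getD_eq_getElem?_getD]
    rw [hps']
    by_cases hiL' : i = L
    · rw [if_pos ⟨trivial, by exact_mod_cast hiL'⟩]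
      have h1 : min k (L+1) - i = 1 := by omega
      rw [h1, List.range'_one]
      subst hiL'
      by_cases hv : validB cs N i = true <;> simp [hv]
    · rw [if_neg (by rintro ⟨-, hc⟩; exact hiL' (by exact_mod_cast hc))]
      rw [show (i:ℤ) + 1 = ((i+1:ℕ):ℤ) by push_cast; ring, ih (i+1) (by omega) (by omega)]
      have h2 : min k (L+1) - i = (min k (L+1) - (i+1)) + 1 := by omega
      rw [h2, List.range'_succ, List.filter_cons]
      by_cases hv : validB cs N i = true <;> simp [hv]

lemma outer_false (cs : List Char) (N k : ℕ) (hkN : k + N ≤ cs.length) (cnt : ℕ) :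
    ∀ (i : ℕ), i + cnt = k → ∀ (ps : List ℤ) (lat0 : ℤ),
    aOuter cs (N:ℤ) (PySem.List.pyRange (i:ℤ) (k:ℤ) 1) ps false lat0 =
      ps ++ (((List.range' i cnt).filter (condB cs N)).head?).elim
        (((List.range' i cnt).filter (validB cs N)).map (Nat.cast : ℕ → ℤ))
        (fun t0 => ((List.range' i (min k (nxt '#' cs t0 + 1) - i)).filter (validB cs N)).map (Nat.cast : ℕ → ℤ)) := by
  induction cnt with
  | zero =>
    intro i hik ps lat0
    rw [PySem.List.pyRange_one_eq_nil (by omega)]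
    simp [aOuter]
  | succ cnt ih =>
    intro i hik ps lat0
    have hik' : i < k := by omega
    rw [PySem.List.pyRange_one_cons (by exact_mod_cast hik')]
    simp only [aOuter, inner_eq cs N i (by omega) false lat0, getD_cast]
    simp only [Bool.false_or, Bool.false_eq_true, if_false, reduceIte]
    have hps' : (if decide (i + N ≤ nxt '.' cs i) = true ∧ cs.getD (i + N) ' ' ≠ '#' then ps ++ [(i:ℤ)] else ps)
        = ps ++ (if validB cs N i then [(i:ℤ)] else []) := by
      by_cases h1 : i + N ≤ nxt '.' cs i <;> by_cases h2 : cs[i + N]?.getD ' ' = '#' <;>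
        simp [validB, h1, h2, List.getD_eq_getElem?_getD]
    rw [hps']
    have hnh_ge := nxt_ge '#' cs i
    by_cases hc : condB cs N i = true
    · simp only [hc, if_true, reduceIte]
      have hhead : ((List.range' i (cnt+1)).filter (condB cs N)).head? = some i := by
        rw [List.range'_succ, List.filter_cons, if_pos hc]; rfl
      rw [hhead]
      simp only [Option.elim]
      by_cases he : i = nxt '#' cs i
      · rw [if_pos ⟨trivial, by exact_mod_cast he⟩]
        have h1 : min k (nxt '#' cs i + 1) - i = 1 := by omega
        rw [h1, List.range'_one]
        by_cases hv : validB cs N i = true <;> simp [hv]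
      · rw [if_neg (by rintro ⟨-, hcc⟩; exact he (by exact_mod_cast hcc))]
        rw [show (i:ℤ) + 1 = ((i+1:ℕ):ℤ) by push_cast; ring,
            outer_true cs N k (nxt '#' cs i) hkN cnt (i+1) (by omega) (by omega)]
        have hmin : i < min k (nxt '#' cs i + 1) := by omega
        have h2 : min k (nxt '#' cs i + 1) - i = (min k (nxt '#' cs i + 1) - (i+1)) + 1 := by omega
        rw [h2, List.range'_succ, List.filter_cons]
        by_cases hv : validB cs N i = true <;> simp [hv]
    · simp only [hc, if_false, Bool.false_eq_true, reduceIte]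
      rw [if_neg (by rintro ⟨hcc, -⟩; exact absurd hcc (by simp))]
      rw [show (i:ℤ) + 1 = ((i+1:ℕ):ℤ) by push_cast; ring, ih (i+1) (by omega)]
      have hfc : ((List.range' i (cnt+1)).filter (condB cs N)) = ((List.range' (i+1) cnt).filter (condB cs N)) := by
        rw [List.range'_succ, List.filter_cons, if_neg (by simp [hc])]
      rw [hfc]
      cases ht0 : ((List.range' (i+1) cnt).filter (condB cs N)).head? with
      | none =>
        simp only [Option.elim]
        rw [List.range'_succ, List.filter_cons]
        by_cases hv : validB cs N i = true <;> simp [hv]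
      | some t0 =>
        simp only [Option.elim]
        have ht0mem : t0 ∈ (List.range' (i+1) cnt).filter (condB cs N) := by
          rcases List.head?_eq_some_iff.mp ht0 with ⟨t, ht⟩
          rw [ht]; exact List.mem_cons_self
        have ht0ge : i + 1 ≤ t0 := by
          have := List.mem_range'_1.mp (List.mem_of_mem_filter ht0mem)
          omega
        have ht0nh : t0 ≤ nxt '#' cs t0 := nxt_ge _ _ _
        have hmin : i < min k (nxt '#' cs t0 + 1) := by omega
        have h2 : min k (nxt '#' cs t0 + 1) - i = (min k (nxt '#' cs t0 + 1) - (i+1)) + 1 := by omega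
        rw [h2, List.range'_succ, List.filter_cons]
        by_cases hv : validB cs N i = true <;> simp [hv]

lemma bLoop_eq (cs : List Char) (N : ℕ) (m : ℕ) : m ≤ cs.length → ∀ (lat : Option ℤ) (res : List ℤ),
    bLoop cs (N:ℤ) (PySem.List.pyRange ((m:ℤ) - 1) (-1) (-1)) ((nxt '.' cs m : ℕ):ℤ) ((nxt '#' cs m : ℕ):ℤ) lat res =
      ((((List.range' 0 (min m (cs.length - N))).filter (condB cs N)).head?).elim lat
          (fun t0 => some ((nxt '#' cs t0 : ℕ):ℤ)),
       res ++ (((List.range' 0 (min m (cs.length - N))).filter (validB cs N)).map (Nat.cast : ℕ → ℤ)).reverse) := by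
  induction m with
  | zero =>
    intro _ lat res
    rw [show ((0:ℕ):ℤ) - 1 = (-1 : ℤ) by norm_num, PySem.List.pyRange_neg_one_eq_nil le_rfl]
    simp [bLoop]
  | succ m ih =>
    intro h lat res
    have hm : m < cs.length := by omega
    rw [show ((m+1:ℕ):ℤ) - 1 = (m:ℤ) by push_cast; ring,
        PySem.List.pyRange_neg_one_cons (by omega)]
    have hget : PySem.List.pyGetD cs (m:ℤ) ' ' = cs[m] := by
      simp [PySem.List.pyGetD_natCast, List.getElem?_eq_getElem hm]
    simp only [bLoop, hget]
    have hdh : (if cs[m] = '.' then ((m:ℤ), ((nxt '#' cs (m+1) : ℕ):ℤ))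
          else if cs[m] = '#' then (((nxt '.' cs (m+1) : ℕ):ℤ), (m:ℤ))
          else (((nxt '.' cs (m+1) : ℕ):ℤ), ((nxt '#' cs (m+1) : ℕ):ℤ)))
        = (((nxt '.' cs m : ℕ):ℤ), ((nxt '#' cs m : ℕ):ℤ)) := by
      rw [nxt_lt '.' cs m hm, nxt_lt '#' cs m hm]
      by_cases h1 : cs[m] = '.'
      · have h2 : ¬ cs[m] = '#' := by rw [h1]; decide
        simp [h1, h2]
      · by_cases h2 : cs[m] = '#' <;> simp [h1, h2]
    rw [hdh]
    have hguard : ((m:ℤ) < (cs.length:ℤ) - (N:ℤ)) ↔ m < cs.length - N := by omega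
    by_cases hg : m < cs.length - N
    · rw [if_pos (hguard.mpr hg)]
      have hlat : (if ((nxt '#' cs m : ℕ):ℤ) < (m:ℤ) + (N:ℤ) ∧ ((nxt '#' cs m : ℕ):ℤ) < ((nxt '.' cs m : ℕ):ℤ)
            then some ((nxt '#' cs m : ℕ):ℤ) else lat)
          = (if condB cs N m then some ((nxt '#' cs m : ℕ):ℤ) else lat) := by
        have : (((nxt '#' cs m : ℕ):ℤ) < (m:ℤ) + (N:ℤ) ∧ ((nxt '#' cs m : ℕ):ℤ) < ((nxt '.' cs m : ℕ):ℤ))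
            ↔ (condB cs N m = true) := by simp [condB]; omega
        by_cases hx : condB cs N m = true
        · rw [if_pos (this.mpr hx), if_pos hx]
        · rw [if_neg (fun hy => hx (this.mp hy)), if_neg hx]
      have hres : (if ((nxt '.' cs m : ℕ):ℤ) ≥ (m:ℤ) + (N:ℤ) ∧ PySem.List.pyGetD cs ((m:ℤ) + (N:ℤ)) ' ' ≠ '#'
            then res ++ [(m:ℤ)] else res)
          = (if validB cs N m then res ++ [(m:ℤ)] else res) := by
        rw [getD_cast]
        by_cases h1 : m + N ≤ nxt '.' cs m <;> by_cases h2 : cs[m + N]?.getD ' ' = '#' <;>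
          simp [validB, h1, h2, List.getD_eq_getElem?_getD] <;> omega
      rw [hlat, hres, ih (by omega)]
      have hmin1 : min m (cs.length - N) = m := by omega
      have hmin2 : min (m+1) (cs.length - N) = m + 1 := by omega
      rw [hmin1, hmin2, List.range'_concat]
      simp only [Nat.zero_add, Nat.one_mul, Prod.mk.injEq]
      refine ⟨?_, ?_⟩
      · cases hF : (List.filter (condB cs N) (List.range' 0 m)).head? with
        | some t0 => simp [List.filter_append, List.head?_append, hF]
        | none =>
          by_cases hc : condB cs N m = true <;>
            simp [List.filter_append, List.head?_append, hF, hc]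
      · by_cases hv : validB cs N m = true <;> simp [hv, List.filter_append]
    · rw [if_neg (fun hy => hg (hguard.mp hy)), ih (by omega)]
      have hmin : min (m+1) (cs.length - N) = min m (cs.length - N) := by omega
      rw [hmin]

lemma trunc (p : ℕ → Bool) (L : ℕ) : ∀ (k : ℕ),
    (((List.range' 0 k).filter p).map (Nat.cast : ℕ → ℤ)).filter (fun x => decide (x ≤ (L:ℤ)))
      = ((List.range' 0 (min k (L+1))).filter p).map (Nat.cast : ℕ → ℤ) := by
  intro k
  induction k with
  | zero => simp
  | succ k ih =>
    rw [List.range'_concat]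
    simp only [Nat.zero_add, Nat.one_mul]
    by_cases hkL : k ≤ L
    · have h1 : min (k+1) (L+1) = k + 1 := by omega
      have h2 : min k (L+1) = k := by omega
      rw [h1, List.range'_concat, List.filter_append, List.filter_append, List.map_append,
          List.filter_append, ih, h2]
      simp only [Nat.zero_add, Nat.one_mul]
      by_cases hp : p k = true <;> simp [hp, hkL]
    · have h1 : min (k+1) (L+1) = min k (L+1) := by omega
      rw [h1, List.filter_append, List.map_append, List.filter_append, ih]
      by_cases hp : p k = true <;> simp [hp, hkL]

-- ===== VERDICT (by name: the statement is the Claim_ definition above) =====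
theorem Function_spec : Claim_equal_Function := by
  intro number s _ hpre
  unfold Spec_Function
  obtain ⟨N, rfl⟩ : ∃ N : ℕ, number = (N:ℤ) := ⟨number.toNat, (Int.toNat_of_nonneg hpre).symm⟩
  simp only [Function, Function_alt]
  set cs := s.toList with hcs
  have hB := bLoop_eq cs N cs.length le_rfl none []
  rw [nxt_of_le '.' cs cs.length le_rfl, nxt_of_le '#' cs cs.length le_rfl] at hB
  rw [hB]
  have hmin : min cs.length (cs.length - N) = cs.length - N := by omega
  rw [hmin]
  by_cases hNn : N ≤ cs.length
  · have hkZ : (cs.length:ℤ) - (N:ℤ) = ((cs.length - N : ℕ):ℤ) := by omega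
    have h0 : (0:ℤ) = ((0:ℕ):ℤ) := by norm_num
    rw [hkZ, h0, outer_false cs N (cs.length - N) (by omega) (cs.length - N) 0 (by omega) [] (cs.length:ℤ)]
    cases hF : ((List.range' 0 (cs.length - N)).filter (condB cs N)).head? with
    | none => simp [hF]
    | some t0 =>
      simp only [hF, Option.elim, List.nil_append, List.reverse_reverse, Nat.sub_zero]
      rw [trunc (validB cs N) (nxt '#' cs t0) (cs.length - N)]
  · have hA : PySem.List.pyRange 0 ((cs.length:ℤ) - (N:ℤ)) 1 = [] :=
      PySem.List.pyRange_one_eq_nil (by omega)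
    have hk0 : cs.length - N = 0 := by omega
    rw [hA, hk0]
    simp [aOuter]
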